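-- pv_equiv track=rewrite | github.com/MrBrainiacJ/cognithor | src/cognithor/api/crew_traces.py | group_by_trace
-- ===== SOURCE A (Python) =====
-- from typing import Any
--
-- def group_by_trace(
--     events: list[dict[str, Any]],
-- ) -> dict[str, list[dict[str, Any]]]:
--     """Group events by `session_id` (== trace_id), preserving file order."""
--     grouped: dict[str, list[dict[str, Any]]] = {}
--     for ev in events:
--         tid = ev.get("session_id")
--         if not tid:
--             continue
--         grouped.setdefault(tid, []).append(ev)
--     return grouped
-- ===== SOURCE B (Python) =====
-- def group_by_trace(events):
--     """Group events by session_id: index the distinct truthy ids first, then build each group by a rescan."""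
--     tids = [ev.get("session_id") for ev in events]
--     keys = list(dict.fromkeys(t for t in tids if t))
--     return {k: [ev for ev in events if ev.get("session_id") == k] for k in keys}
-- ===== Notes on version B (the rewrite author's own statement) =====
-- stated objective: alternative
-- what changed: Replaces A's single setdefault/append accumulation pass with a two-phase strategy: first collect the distinct truthy session_ids in first-appearance order via dict.fromkeys, then build each group by a per-key comprehension rescan of the events.
import Mathlib
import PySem

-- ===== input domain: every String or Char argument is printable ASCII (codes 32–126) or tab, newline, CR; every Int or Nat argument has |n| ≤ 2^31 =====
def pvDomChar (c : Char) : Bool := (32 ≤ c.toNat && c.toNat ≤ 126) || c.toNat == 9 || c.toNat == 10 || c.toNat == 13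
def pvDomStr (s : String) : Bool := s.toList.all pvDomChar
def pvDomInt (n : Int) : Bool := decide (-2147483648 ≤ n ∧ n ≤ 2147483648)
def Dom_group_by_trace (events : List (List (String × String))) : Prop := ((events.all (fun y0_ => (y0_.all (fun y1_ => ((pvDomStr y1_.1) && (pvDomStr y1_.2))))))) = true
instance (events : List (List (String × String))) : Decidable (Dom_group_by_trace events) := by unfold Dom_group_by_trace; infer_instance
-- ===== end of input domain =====

-- B replaces A's single setdefault/append pass by an index-first strategy (distinct truthy ids
-- in first-appearance order, then one rescan per key); objective: alternative decomposition.

-- ===== PORT A =====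
-- ev.get("session_id") : first-match lookup in the event's association list
def pvGetSid (ev : List (String × String)) : Option String :=
  (PySem.Dict.mk ev).get? "session_id"

-- literal port of A: one pass, `grouped.setdefault(tid, []).append(ev)` is
-- `grouped.modify tid [] (· ++ [ev])` (d[k] = d.get(k, []) + [ev], same key order)
def group_by_trace (events : List (List (String × String))) : List (String × List (List (String × String))) :=
  (events.foldl
    (fun grouped ev =>
      match pvGetSid ev with
      | none => grouped
      | some tid => if tid = "" then grouped else grouped.modify tid [] (· ++ [ev]))
    PySem.Dict.empty).items

-- ===== PORT B =====
-- `t for t in tids if t` : keep the truthy values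
def pvTruthy (o : Option String) : Option String :=
  match o with
  | some t => if t = "" then none else some t
  | none => none

def group_by_trace_alt (events : List (List (String × String))) : List (String × List (List (String × String))) :=
  let tids := events.map pvGetSid
  let keys := PySem.List.dedup (tids.filterMap pvTruthy)   -- list(dict.fromkeys(...))
  keys.map (fun k => (k, events.filter (fun ev => pvGetSid ev == some k)))

-- ===== PRECONDITION & SPEC =====
def Spec_group_by_trace (events : List (List (String × String))) (out : List (String × List (List (String × String)))) : Prop := out = group_by_trace_alt events
instance (events : List (List (String × String))) (out : List (String × List (List (String × String)))) : Decidable (Spec_group_by_trace events out) := by unfold Spec_group_by_trace; infer_instance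

-- ===== CLAIM (what is proved, stated in full; the proofs are below) =====
def Claim_equal_group_by_trace : Prop := ∀ (events : List (List (String × String))), Dom_group_by_trace events → Spec_group_by_trace events (group_by_trace events)

-- ===== LEMMAS AND PROOFS =====

-- the truthy session id of one event
def pvTid (ev : List (String × String)) : Option String := pvTruthy (pvGetSid ev)

-- the (key, event) pairs A's loop actually touches
def pvPairs (events : List (List (String × String))) : List (String × List (String × String)) :=
  events.filterMap (fun ev => (pvTid ev).map (fun t => (t, ev)))

lemma pvPairs_cons (ev : List (String × String)) (rest : List (List (String × String))) :
    pvPairs (ev :: rest) =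
      match pvTid ev with
      | none => pvPairs rest
      | some t => (t, ev) :: pvPairs rest := by
  unfold pvPairs
  cases h : pvTid ev <;> simp [h]

-- A's skipping fold = the grouping fold over pvPairs
lemma foldA_eq_pairs (events : List (List (String × String)))
    (d : PySem.Dict String (List (List (String × String)))) :
    events.foldl
      (fun grouped ev =>
        match pvGetSid ev with
        | none => grouped
        | some tid => if tid = "" then grouped else grouped.modify tid [] (· ++ [ev]))
      d
    = (pvPairs events).foldl (fun d p => d.modify p.1 [] (· ++ [p.2])) d := by
  induction events generalizing d with
  | nil => rfl
  | cons ev rest ih =>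
    rw [List.foldl_cons, pvPairs_cons]
    cases h : pvGetSid ev with
    | none =>
      have ht : pvTid ev = none := by unfold pvTid pvTruthy; rw [h]
      rw [ht]; exact ih d
    | some t =>
      by_cases he : t = ""
      · have ht : pvTid ev = none := by unfold pvTid pvTruthy; rw [h]; simp [he]
        rw [ht]; simp only [he]; exact ih d
      · have ht : pvTid ev = some t := by unfold pvTid pvTruthy; rw [h]; simp [he]
        rw [ht]; simp only [if_neg he, List.foldl_cons]; exact ih _

lemma fst_pvPairs (events : List (List (String × String))) :
    (pvPairs events).map (·.1) = events.filterMap pvTid := by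
  induction events with
  | nil => rfl
  | cons ev rest ih =>
    rw [pvPairs_cons, List.filterMap_cons]
    cases h : pvTid ev <;> simp [ih]

lemma mem_filterMap_pvTid_ne_empty {events : List (List (String × String))} {k : String}
    (hk : k ∈ events.filterMap pvTid) : k ≠ "" := by
  rcases List.mem_filterMap.1 hk with ⟨ev, _, hev⟩
  unfold pvTid pvTruthy at hev
  cases hg : pvGetSid ev <;> rw [hg] at hev
  · simp at hev
  · rename_i t
    by_cases ht : t = ""
    · simp [ht] at hev
    · simp [ht] at hev
      subst hev; exact ht

lemma snd_filter_pvPairs (events : List (List (String × String))) (k : String) (hk : k ≠ "") :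
    ((pvPairs events).filter (fun p => p.1 == k)).map (·.2)
    = events.filter (fun ev => pvGetSid ev == some k) := by
  induction events with
  | nil => rfl
  | cons ev rest ih =>
    rw [pvPairs_cons, List.filter_cons]
    cases h : pvTid ev with
    | none =>
      have hne : (pvGetSid ev == some k) = false := by
        unfold pvTid pvTruthy at h
        cases hg : pvGetSid ev <;> rw [hg] at h
        · simp
        · rename_i t
          by_cases ht : t = ""
          · simp [ht, hk.symm]
          · simp [ht] at h
      simp only [hne, Bool.false_eq_true, if_false]
      exact ih
    | some t =>
      have hg : pvGetSid ev = some t := by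
        unfold pvTid pvTruthy at h
        cases hg : pvGetSid ev <;> rw [hg] at h
        · simp at h
        · rename_i u
          by_cases hu : u = ""
          · simp [hu] at h
          · simp [hu] at h; rw [h]
      by_cases htk : t = k
      · subst htk
        simp [hg, ih]
      · have hne : (pvGetSid ev == some k) = false := by simp [hg, htk]
        simp [hg, htk, ih]

lemma altB_eq (events : List (List (String × String))) :
    group_by_trace_alt events
    = (PySem.List.dedup (events.filterMap pvTid)).map
        (fun k => (k, events.filter (fun ev => pvGetSid ev == some k))) := by
  unfold group_by_trace_alt
  dsimp only
  rw [List.filterMap_map]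
  rfl

-- ===== VERDICT (by name: the statement is the Claim_ definition above) =====
theorem group_by_trace_spec : Claim_equal_group_by_trace := by
  intro events _
  show group_by_trace events = group_by_trace_alt events
  unfold group_by_trace
  rw [foldA_eq_pairs, altB_eq]
  set d := (pvPairs events).foldl (fun d p => d.modify p.1 [] (· ++ [p.2])) PySem.Dict.empty with hd
  have hkeys : d.keys = PySem.List.dedup (events.filterMap pvTid) := by
    rw [hd,
      PySem.Dict.keys_foldl_modify_key (pvPairs events) (·.1) [] (fun _ p v => v ++ [p.2]) PySem.Dict.empty,
      PySem.Dict.keys_empty, PySem.Set.update_nil_left, fst_pvPairs]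
    rfl
  have hnodup : d.keys.Nodup := by
    rw [hd]
    exact PySem.Dict.nodup_keys_foldl_modify_key (pvPairs events) (·.1) [] (fun _ p v => v ++ [p.2])
      PySem.Dict.empty (by simp [PySem.Dict.keys_empty])
  rw [PySem.Dict.items_eq_map_keys d hnodup [], hkeys]
  apply List.map_congr_left
  intro k hkmem
  have hk : k ≠ "" := mem_filterMap_pvTid_ne_empty ((PySem.List.mem_dedup _ _).1 hkmem)
  have hv : d.getD k [] = events.filter (fun ev => pvGetSid ev == some k) := by
    rw [hd, PySem.Dict.getD_foldl_modify_append, PySem.Dict.getD_empty]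
    simpa using snd_filter_pvPairs events k hk
  rw [hv]
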